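-- pv_equiv track=rewrite | github.com/cla7aye15I4nd/TypePython | tests/fixtures/valid/advanced/algorithms/combinatorics.py | pascal_triangle_sum
-- ===== SOURCE A (Python) =====
-- def combination(n: int, k: int) -> int:
--     if k > n:
--         return 0
--     if k == 0 or k == n:
--         return 1
--
--     # C(n,k) = n! / (k! * (n-k)!)
--     # Optimize by using C(n,k) = C(n,n-k) if k > n-k
--     if k > n - k:
--         k = n - k
--
--     result: int = 1
--     i: int = 0
--
--     while i < k:
--         result = result * (n - i)
--         result = result // (i + 1)
--         i = i + 1
--
--     return result
--
-- def pascal_triangle_sum(rows: int) -> int: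
--     sum: int = 0
--     n: int = 0
--
--     while n < rows:
--         k: int = 0
--         while k <= n:
--             sum = sum + combination(n, k)
--             k = k + 1
--         n = n + 1
--
--     return sum
-- ===== SOURCE B (Python) =====
-- def pascal_triangle_sum(rows: int) -> int:
--     # Sum of all entries of the first `rows` Pascal rows = 2^rows - 1 (closed form).
--     return (1 << rows) - 1 if rows > 0 else 0
-- ===== Notes on version B (the rewrite author's own statement) =====
-- stated objective: faster
-- what changed: Replaces the nested loops over Pascal's triangle (each entry recomputed by a multiplicative loop) with the closed-form power-of-two formula for the total, computed by one big-int shift.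
import Mathlib
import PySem

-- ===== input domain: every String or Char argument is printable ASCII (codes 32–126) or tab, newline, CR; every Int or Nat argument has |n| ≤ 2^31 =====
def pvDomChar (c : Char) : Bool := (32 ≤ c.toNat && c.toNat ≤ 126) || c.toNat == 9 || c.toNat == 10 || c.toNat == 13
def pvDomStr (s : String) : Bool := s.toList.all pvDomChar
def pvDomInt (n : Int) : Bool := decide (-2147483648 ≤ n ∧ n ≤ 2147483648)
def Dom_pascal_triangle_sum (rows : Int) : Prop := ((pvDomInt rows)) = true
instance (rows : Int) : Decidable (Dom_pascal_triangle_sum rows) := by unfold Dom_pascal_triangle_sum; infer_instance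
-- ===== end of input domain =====

-- B replaces A's double loop (rows of binomial coefficients, each computed by a
-- multiplicative loop) with the closed form 2^rows - 1; objective: faster (asymptotic).

-- ===== PORT A =====
-- while i < k: result = result * (n - i) // (i + 1); i = i + 1
def pvCombLoop (n k result i : Int) : Int :=
  if _h : i < k then
    pvCombLoop n k (PySem.Int.floordiv (result * (n - i)) (i + 1)) (i + 1)
  else result
termination_by (k - i).toNat
decreasing_by omega

def combination (n k : Int) : Int :=
  if k > n then 0
  else if k = 0 ∨ k = n then 1
  else
    let k' := if k > n - k then n - k else k
    pvCombLoop n k' 1 0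

-- inner loop: while k <= n: sum = sum + combination(n, k); k = k + 1
def pvInnerLoop (n k sum : Int) : Int :=
  if _h : k ≤ n then pvInnerLoop n (k + 1) (sum + combination n k) else sum
termination_by (n - k + 1).toNat
decreasing_by omega

-- outer loop: while n < rows: <inner loop>; n = n + 1
def pvOuterLoop (rows n sum : Int) : Int :=
  if _h : n < rows then pvOuterLoop rows (n + 1) (pvInnerLoop n 0 sum) else sum
termination_by (rows - n).toNat
decreasing_by omega

def pascal_triangle_sum (rows : Int) : Int := pvOuterLoop rows 0 0

-- ===== PORT B =====
-- return (1 << rows) - 1 if rows > 0 else 0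
def pascal_triangle_sum_alt (rows : Int) : Int :=
  if rows > 0 then (1 <<< rows.toNat : Int) - 1 else 0

-- ===== PRECONDITION & SPEC =====
def Spec_pascal_triangle_sum (rows : Int) (out : Int) : Prop := out = pascal_triangle_sum_alt rows
instance (rows : Int) (out : Int) : Decidable (Spec_pascal_triangle_sum rows out) := by unfold Spec_pascal_triangle_sum; infer_instance

-- ===== CLAIM (what is proved, stated in full; the proofs are below) =====
def Claim_equal_pascal_triangle_sum : Prop := ∀ (rows : Int), Dom_pascal_triangle_sum rows → Spec_pascal_triangle_sum rows (pascal_triangle_sum rows)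

-- ===== LEMMAS AND PROOFS =====

theorem pvShift (t : Nat) : (1 <<< t : Int) = 2 ^ t := by
  simp [Int.shiftLeft_eq]

-- The multiplicative loop maintains result = C(n, i); each floor division is exact.
theorem pvCombLoop_choose (n k : Nat) (hkn : k ≤ n) :
    ∀ (d i : Nat), i + d = k →
      pvCombLoop (n : Int) (k : Int) ((n.choose i : Nat) : Int) (i : Int)
        = ((n.choose k : Nat) : Int) := by
  intro d
  induction d with
  | zero =>
    intro i hi
    rw [pvCombLoop]
    have : ¬ ((i : Int) < (k : Int)) := by omega
    simp [hi.symm]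
  | succ d ih =>
    intro i hi
    have hik : i < k := by omega
    have hin : i < n := by omega
    rw [pvCombLoop]
    have hlt : ((i : Int) < (k : Int)) := by exact_mod_cast hik
    simp only [hlt, dif_pos]
    have hsub : ((n : Int) - (i : Int)) = ((n - i : Nat) : Int) := by omega
    have hmul : n.choose i * (n - i) = n.choose (i + 1) * (i + 1) :=
      (Nat.choose_succ_right_eq n i).symm
    have hdiv : PySem.Int.floordiv (((n.choose i : Nat) : Int) * ((n : Int) - (i : Int))) ((i : Int) + 1)
        = ((n.choose (i + 1) : Nat) : Int) := by
      rw [hsub]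
      have h1 : (((n.choose i : Nat) : Int) * ((n - i : Nat) : Int)) = ((n.choose (i+1) * (i+1) : Nat) : Int) := by
        push_cast [← hmul]; ring
      have h2 : ((i : Int) + 1) = ((i + 1 : Nat) : Int) := by push_cast; ring
      rw [h1, h2, PySem.Int.floordiv_natCast]
      norm_num [Nat.mul_div_cancel]
    rw [hdiv]
    have h2 : ((i : Int) + 1) = ((i + 1 : Nat) : Int) := by push_cast; ring
    rw [h2]
    exact ih (i + 1) (by omega)

theorem combination_choose (n k : Nat) (hk : k ≤ n) :
    combination (n : Int) (k : Int) = ((n.choose k : Nat) : Int) := by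
  unfold combination
  have hng : ¬ ((k : Int) > (n : Int)) := by omega
  rw [if_neg hng]
  by_cases h0 : (k : Int) = 0 ∨ (k : Int) = (n : Int)
  · rw [if_pos h0]
    rcases h0 with h | h
    · have : k = 0 := by exact_mod_cast h
      simp [this]
    · have : k = n := by exact_mod_cast h
      simp [this]
  · rw [if_neg h0]
    push_neg at h0
    have hk0 : 0 < k := by
      rcases Nat.eq_zero_or_pos k with h | h
      · exact absurd (by exact_mod_cast congrArg (Nat.cast (R := Int)) h) h0.1
      · exact h
    have hkn : k < n := lt_of_le_of_ne hk (by intro h; exact h0.2 (by exact_mod_cast h))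
    by_cases hbig : (k : Int) > (n : Int) - (k : Int)
    · rw [if_pos hbig]
      have hsub : ((n : Int) - (k : Int)) = ((n - k : Nat) : Int) := by omega
      rw [hsub]
      have h1 : (1 : Int) = ((n.choose 0 : Nat) : Int) := by simp
      have h2 : (0 : Int) = ((0 : Nat) : Int) := by simp
      rw [h1, h2, pvCombLoop_choose n (n - k) (by omega) (n - k) 0 (by omega)]
      exact congrArg _ (Nat.choose_symm hk)
    · rw [if_neg hbig]
      have h1 : (1 : Int) = ((n.choose 0 : Nat) : Int) := by simp
      have h2 : (0 : Int) = ((0 : Nat) : Int) := by simp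
      rw [h1, h2, pvCombLoop_choose n k hk k 0 (by omega)]

-- Row sum: the inner loop adds C(n,k)+…+C(n,n) to sum.
theorem pvInnerLoop_eq (n : Nat) :
    ∀ (d k : Nat) (sum : Int), k + d = n + 1 →
      pvInnerLoop (n : Int) (k : Int) sum
        = sum + ((∑ j ∈ Finset.Ico k (n + 1), n.choose j : Nat) : Int) := by
  intro d
  induction d with
  | zero =>
    intro k sum hk
    rw [pvInnerLoop]
    have : ¬ ((k : Int) ≤ (n : Int)) := by omega
    simp [this, hk.symm]
  | succ d ih =>
    intro k sum hk
    have hkn : k ≤ n := by omega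
    rw [pvInnerLoop]
    have hle : ((k : Int) ≤ (n : Int)) := by exact_mod_cast hkn
    simp only [hle, dif_pos]
    have h2 : ((k : Int) + 1) = ((k + 1 : Nat) : Int) := by push_cast; ring
    rw [combination_choose n k hkn, h2, ih (k + 1) _ (by omega)]
    rw [Finset.sum_eq_sum_Ico_succ_bot (show k < n + 1 by omega) n.choose]
    push_cast
    ring

theorem pvInnerLoop_pow (n : Nat) (sum : Int) :
    pvInnerLoop (n : Int) 0 sum = sum + 2 ^ n := by
  have h0 : ((0 : Nat) : Int) = (0 : Int) := rfl
  rw [← h0, pvInnerLoop_eq n (n + 1) 0 sum (by omega)]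
  have : ∑ j ∈ Finset.Ico 0 (n + 1), n.choose j = 2 ^ n := by
    rw [Finset.range_eq_Ico.symm]
    exact Nat.sum_range_choose n
  rw [this]
  push_cast
  ring

theorem pvOuterLoop_eq (R : Nat) :
    ∀ (d m : Nat), m + d = R →
      pvOuterLoop (R : Int) (m : Int) (2 ^ m - 1) = 2 ^ R - 1 := by
  intro d
  induction d with
  | zero =>
    intro m hm
    rw [pvOuterLoop]
    have : ¬ ((m : Int) < (R : Int)) := by omega
    simp [this, hm.symm]
  | succ d ih =>
    intro m hm
    rw [pvOuterLoop]
    have hlt : ((m : Int) < (R : Int)) := by exact_mod_cast (by omega : m < R)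
    simp only [hlt, dif_pos]
    rw [pvInnerLoop_pow]
    have h2 : ((m : Int) + 1) = ((m + 1 : Nat) : Int) := by push_cast; ring
    have h3 : (2 : Int) ^ m - 1 + 2 ^ m = 2 ^ (m + 1) - 1 := by ring
    rw [h3, h2]
    exact ih (m + 1) (by omega)

-- ===== VERDICT (by name: the statement is the Claim_ definition above) =====
theorem pascal_triangle_sum_spec : Claim_equal_pascal_triangle_sum := by
  intro rows _
  unfold Spec_pascal_triangle_sum pascal_triangle_sum pascal_triangle_sum_alt
  by_cases hr : rows > 0
  · rw [if_pos hr, pvShift]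
    obtain ⟨R, hR⟩ : ∃ R : Nat, rows = (R : Int) := ⟨rows.toNat, by omega⟩
    subst hR
    have h := pvOuterLoop_eq R R 0 (by omega)
    norm_num at h
    simpa using h
  · rw [if_neg hr, pvOuterLoop]
    have : ¬ ((0 : Int) < rows) := by omega
    simp [this]
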